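-- pv_equiv track=rewrite | github.com/viator3m/algorithms | sprint_2/L_fibonacci_modulo.py | get_fibonacci_number
-- ===== SOURCE A (Python) =====
-- def get_fibonacci_number(number, k):
--     num_1, num_2 = 1, 1
--     if number <= 1:
--         return 1
--     else:
--         for _ in range(number - 1):
--             num_1, num_2 = num_2, (num_2 + num_1) % 10 ** k
--         return num_2
-- ===== SOURCE B (Python) =====
-- def get_fibonacci_number(number, k):
--     if number <= 1:
--         return 1
--     m = 10 ** k
--
--     def fib_pair(n):
--         # returns (F(n) % m, F(n+1) % m), fast doubling
--         if n == 0: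
--             return (0 % m, 1 % m)
--         a, b = fib_pair(n // 2)
--         c = (a * (2 * b - a)) % m
--         d = (a * a + b * b) % m
--         if n % 2 == 0:
--             return (c, d)
--         return (d, (c + d) % m)
--
--     return fib_pair(number + 1)[0]
-- ===== Notes on version B (the rewrite author's own statement) =====
-- stated objective: faster
-- what changed: replaces the O(number) iterative Fibonacci loop with fast-doubling recursion modulo 10**k, O(log number)
-- outside the precondition, e.g. on get_fibonacci_number(2, -1): A returns 0.0999999999999999, B returns 0.0001999999999999996
import Mathlib
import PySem

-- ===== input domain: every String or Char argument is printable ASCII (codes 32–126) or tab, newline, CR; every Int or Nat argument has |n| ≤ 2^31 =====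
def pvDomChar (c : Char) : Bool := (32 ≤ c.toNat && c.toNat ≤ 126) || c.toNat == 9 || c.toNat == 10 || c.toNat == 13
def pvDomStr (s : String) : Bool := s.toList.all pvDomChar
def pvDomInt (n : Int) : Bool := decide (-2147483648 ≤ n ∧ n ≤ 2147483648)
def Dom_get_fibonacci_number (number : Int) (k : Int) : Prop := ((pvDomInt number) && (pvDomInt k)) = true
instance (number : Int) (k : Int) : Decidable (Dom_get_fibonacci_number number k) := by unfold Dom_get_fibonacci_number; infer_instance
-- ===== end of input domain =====

-- B replaces A's O(number) iterative Fibonacci loop with fast-doubling recursion mod 10^k (O(log number)).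


-- ===== PORT A =====
-- the for-loop of A, as structural recursion over the iteration count; state = (num_1, num_2)
def pvALoop (m : Int) : Nat → Int × Int
  | 0 => (1, 1)
  | i + 1 =>
    let p := pvALoop m i
    (p.2, PySem.Int.mod (p.2 + p.1) m)

def get_fibonacci_number (number : Int) (k : Int) : Int :=
  if number ≤ 1 then 1
  else (pvALoop (10 ^ k.toNat) (number - 1).toNat).2

-- ===== PORT B =====
-- fast doubling: pvFibPair m n = (F(n) % m, F(n+1) % m), transliterating Source B's fib_pair
def pvFibPair (m : Int) (n : Nat) : Int × Int :=
  if _h : n = 0 then (PySem.Int.mod 0 m, PySem.Int.mod 1 m)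
  else
    let p := pvFibPair m (n / 2)
    let a := p.1
    let b := p.2
    let c := PySem.Int.mod (a * (2 * b - a)) m
    let d := PySem.Int.mod (a * a + b * b) m
    if n % 2 = 0 then (c, d) else (d, PySem.Int.mod (c + d) m)
termination_by n
decreasing_by exact Nat.div_lt_self (Nat.pos_of_ne_zero _h) (by norm_num)

def get_fibonacci_number_alt (number : Int) (k : Int) : Int :=
  if number ≤ 1 then 1
  else (pvFibPair (10 ^ k.toNat) (number + 1).toNat).1

-- ===== PRECONDITION & SPEC =====
-- For number ≥ 2 and k < 0, Python's 10 ** k is a float and both A and B return a float,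
-- not an int; Pre_ excludes exactly those inputs (A returns no value of the declared type there).
def Pre_get_fibonacci_number (number : Int) (k : Int) : Prop := number ≤ 1 ∨ 0 ≤ k
instance (number : Int) (k : Int) : Decidable (Pre_get_fibonacci_number number k) := by
  unfold Pre_get_fibonacci_number; infer_instance

def pvWitness_get_fibonacci_number : Int × Int := (10, 3)

def Spec_get_fibonacci_number (number : Int) (k : Int) (out : Int) : Prop := out = get_fibonacci_number_alt number k
instance (number : Int) (k : Int) (out : Int) : Decidable (Spec_get_fibonacci_number number k out) := by unfold Spec_get_fibonacci_number; infer_instance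

-- ===== CLAIM (what is proved, stated in full; the proofs are below) =====
def Claim_equal_get_fibonacci_number : Prop := ∀ (number : Int) (k : Int), Dom_get_fibonacci_number number k → Pre_get_fibonacci_number number k → Spec_get_fibonacci_number number k (get_fibonacci_number number k)

-- ===== LEMMAS AND PROOFS =====

theorem pvALoop_spec (m : Int) (hm : 0 < m) (i : Nat) :
    (pvALoop m i).1 % m = (Nat.fib (i + 1) : Int) % m ∧
    (pvALoop m i).2 % m = (Nat.fib (i + 2) : Int) % m := by
  induction i with
  | zero => simp [pvALoop, Nat.fib]
  | succ i ih =>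
    obtain ⟨h1, h2⟩ := ih
    constructor
    · simpa [pvALoop] using h2
    · simp only [pvALoop, PySem.Int.mod_eq_emod_of_pos hm, Int.emod_emod_of_dvd _ dvd_rfl]
      have : ((pvALoop m i).2 + (pvALoop m i).1) % m
          = ((Nat.fib (i + 2) : Int) + (Nat.fib (i + 1) : Int)) % m :=
        Int.ModEq.add h2 h1
      rw [this]
      have hf : Nat.fib (i + 1 + 2) = Nat.fib (i + 1) + Nat.fib (i + 2) := Nat.fib_add_two
      rw [hf]
      push_cast
      ring_nf

theorem pvALoop_reduced (m : Int) (hm : 0 < m) (i : Nat) :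
    (pvALoop m (i + 1)).2 % m = (pvALoop m (i + 1)).2 := by
  simp [pvALoop, PySem.Int.mod_eq_emod_of_pos hm, Int.emod_emod_of_dvd _ dvd_rfl]

theorem pvFibPair_spec (m : Int) (hm : 0 < m) (n : Nat) :
    pvFibPair m n = ((Nat.fib n : Int) % m, (Nat.fib (n + 1) : Int) % m) := by
  induction n using Nat.strong_induction_on with
  | _ n ih =>
    rw [pvFibPair]
    by_cases h0 : n = 0
    · simp [h0, PySem.Int.mod_eq_emod_of_pos hm]
    · have hrec := ih (n / 2) (Nat.div_lt_self (Nat.pos_of_ne_zero h0) (by norm_num))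
      simp only [h0, dif_neg, not_false_iff, hrec,
        PySem.Int.mod_eq_emod_of_pos hm]
      set h := n / 2 with hh
      have hc : ((Nat.fib h : Int) % m * (2 * ((Nat.fib (h+1) : Int) % m) - (Nat.fib h : Int) % m)) % m
          = ((Nat.fib (2 * h) : Int)) % m := by
        have hmeq : ((Nat.fib h : Int) % m * (2 * ((Nat.fib (h+1) : Int) % m) - (Nat.fib h : Int) % m)) % m
            = ((Nat.fib h : Int) * (2 * (Nat.fib (h+1) : Int) - (Nat.fib h : Int))) % m := by
          exact (Int.ModEq.mul (Int.emod_emod_of_dvd _ dvd_rfl)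
            (Int.ModEq.sub (Int.ModEq.mul_left 2 (Int.emod_emod_of_dvd _ dvd_rfl))
              (Int.emod_emod_of_dvd _ dvd_rfl)))
        rw [hmeq]
        congr 1
        have hle : Nat.fib h ≤ 2 * Nat.fib (h + 1) :=
          le_trans (Nat.fib_le_fib_succ) (by omega)
        have := Nat.fib_two_mul h
        zify [hle] at this
        rw [this]
      have hd : (((Nat.fib h : Int) % m) * ((Nat.fib h : Int) % m)
            + ((Nat.fib (h+1) : Int) % m) * ((Nat.fib (h+1) : Int) % m)) % m
          = ((Nat.fib (2 * h + 1) : Int)) % m := by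
        have hmeq : (((Nat.fib h : Int) % m) * ((Nat.fib h : Int) % m)
              + ((Nat.fib (h+1) : Int) % m) * ((Nat.fib (h+1) : Int) % m)) % m
            = ((Nat.fib h : Int) * (Nat.fib h : Int)
              + (Nat.fib (h+1) : Int) * (Nat.fib (h+1) : Int)) % m := by
          exact Int.ModEq.add
            (Int.ModEq.mul (Int.emod_emod_of_dvd _ dvd_rfl) (Int.emod_emod_of_dvd _ dvd_rfl))
            (Int.ModEq.mul (Int.emod_emod_of_dvd _ dvd_rfl) (Int.emod_emod_of_dvd _ dvd_rfl))
        rw [hmeq]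
        congr 1
        have := Nat.fib_two_mul_add_one h
        zify at this
        rw [this]
        ring
      by_cases hpar : n % 2 = 0
      · have hn : 2 * h = n := by omega
        simp only [hpar, if_true]
        rw [hc, hd, hn]
      · have hn : 2 * h + 1 = n := by omega
        simp only [hpar, if_false]
        rw [hc, hd]
        have hsum : ((Nat.fib (2*h) : Int) % m + (Nat.fib (2*h+1) : Int) % m) % m
            = ((Nat.fib (n+1) : Int)) % m := by
          have hq : ((Nat.fib (2*h) : Int) % m + (Nat.fib (2*h+1) : Int) % m) % m
              = ((Nat.fib (2*h) : Int) + (Nat.fib (2*h+1) : Int)) % m :=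
            Int.ModEq.add (Int.emod_emod_of_dvd _ dvd_rfl) (Int.emod_emod_of_dvd _ dvd_rfl)
          rw [hq]
          congr 1
          have h2 : n + 1 = 2*h + 2 := by omega
          rw [h2, Nat.fib_add_two]
          push_cast
          ring
        rw [hsum, hn]

-- ===== VERDICT (by name: the statement is the Claim_ definition above) =====
theorem get_fibonacci_number_spec : Claim_equal_get_fibonacci_number := by
  intro number k _hdom hpre
  unfold Spec_get_fibonacci_number get_fibonacci_number get_fibonacci_number_alt
  by_cases hle : number ≤ 1
  · simp [hle]
  · simp only [hle, if_false]
    have hm : (0 : Int) < 10 ^ k.toNat := by positivity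
    set m := (10 : Int) ^ k.toNat
    have h2 : 2 ≤ number := by omega
    obtain ⟨i, hi⟩ : ∃ i : Nat, (number - 1).toNat = i + 1 := by
      refine ⟨(number - 2).toNat, by omega⟩
    have hn1 : (number + 1).toNat = i + 3 := by omega
    rw [hi, hn1, pvFibPair_spec m hm]
    have := (pvALoop_spec m hm (i + 1)).2
    rw [← pvALoop_reduced m hm i, this]
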